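-- pv_equiv track=rewrite | github.com/AkatQuas/kiddo-plays | python-language/crack-code-cipher/c17_word2pattern.py | word2pattern
-- ===== SOURCE A (Python) =====
-- def word2pattern(word):
--     word = word.upper()
--     nextNum = 0
--     letters = {}
--     pattern = []
--     for c in word:
--         if c not in letters:
--             letters[c] = str(nextNum)
--             nextNum += 1
--         pattern.append(letters[c])
--     return '.'.join(pattern)
-- ===== SOURCE B (Python) =====
-- def word2pattern(word):
--     w = word.upper()
--     return '.'.join(str(len(set(w[:w.index(c)]))) for c in w)
-- ===== Notes on version B (the rewrite author's own statement) =====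
-- stated objective: alternative
-- what changed: Drops A's incremental dict entirely: each character's pattern number is computed directly as the number of distinct letters strictly before its first occurrence (len(set(w[:w.index(c)]))), trading A's O(n) stateful loop for a stateless O(n^2) per-character formula.
import Mathlib
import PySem

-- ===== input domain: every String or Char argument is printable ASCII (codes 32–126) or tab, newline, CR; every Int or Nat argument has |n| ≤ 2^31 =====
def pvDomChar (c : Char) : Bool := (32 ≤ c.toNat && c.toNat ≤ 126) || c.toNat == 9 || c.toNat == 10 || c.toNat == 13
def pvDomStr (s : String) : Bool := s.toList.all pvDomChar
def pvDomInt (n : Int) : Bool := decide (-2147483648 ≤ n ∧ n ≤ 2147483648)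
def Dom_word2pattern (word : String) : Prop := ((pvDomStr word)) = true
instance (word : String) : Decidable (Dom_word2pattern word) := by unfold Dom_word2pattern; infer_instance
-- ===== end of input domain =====

-- B drops A's incremental dict: each character's number is computed stateless as the count of
-- distinct letters strictly before its first occurrence; objective: alternative algorithm.

-- ===== PORT A =====
-- one loop step of A: maybe register the fresh letter, then append its stored number
def word2patternStep (st : Int × PySem.Dict Char String × List String) (c : Char) :
    Int × PySem.Dict Char String × List String :=
  let upd :=
    if st.2.1.contains c = false then (st.1 + 1, st.2.1.insert c (PySem.Int.toStr st.1))
    else (st.1, st.2.1)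
  (upd.1, upd.2, st.2.2 ++ [upd.2.getD c ""])

def word2pattern (word : String) : String :=
  PySem.Str.join "."
    ((PySem.Str.upper word).toList.foldl word2patternStep (0, PySem.Dict.empty, [])).2.2

-- ===== PORT B =====
-- str(len(set(w[:w.index(c)]))) for each c of w; every c comes from w, so w.index(c) never
-- raises — the none branch is unreachable and only makes the port total.
def word2pattern_alt (word : String) : String :=
  let u := (PySem.Str.upper word).toList
  PySem.Str.join "."
    (u.map fun c =>
      match PySem.List.index? u c with
      | some i => PySem.Int.toStr ((PySem.Set.ofList (PySem.List.slice u none (some (i : Int)))).length : Int)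
      | none => "")

-- ===== PRECONDITION & SPEC =====
def Spec_word2pattern (word : String) (out : String) : Prop := out = word2pattern_alt word
instance (word : String) (out : String) : Decidable (Spec_word2pattern word out) := by unfold Spec_word2pattern; infer_instance

-- ===== CLAIM (what is proved, stated in full; the proofs are below) =====
def Claim_equal_word2pattern : Prop := ∀ (word : String), Dom_word2pattern word → Spec_word2pattern word (word2pattern word)

-- ===== LEMMAS AND PROOFS =====

-- foldl over Set.add only appends: the accumulator stays a prefix
lemma foldl_add_prefix (l : List Char) : ∀ (s : List Char),
    ∃ t, List.foldl PySem.Set.add s l = s ++ t := by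
  induction l with
  | nil => exact fun s => ⟨[], by simp⟩
  | cons c l ih =>
    intro s
    simp only [List.foldl_cons, PySem.Set.add]
    split
    · exact ih s
    · obtain ⟨t, ht⟩ := ih (s ++ [c])
      exact ⟨c :: t, by simpa using ht⟩

lemma mem_foldl_add_iff (pre : List Char) (c : Char) :
    c ∈ List.foldl PySem.Set.add ([] : List Char) pre ↔ c ∈ pre := by
  have := PySem.Set.mem_ofList (xs := pre) (y := c)
  simpa [PySem.Set.ofList, PySem.Set.empty] using this

lemma dedup_mid_of_mem {pre : List Char} {c : Char} (h : c ∈ pre) (suf : List Char) :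
    PySem.List.dedup ((pre ++ [c]) ++ suf) = PySem.List.dedup (pre ++ suf) := by
  simp only [PySem.List.dedup, PySem.Set.ofList, PySem.Set.empty, List.append_assoc,
    List.singleton_append, List.foldl_append, List.foldl_cons]
  have hc : PySem.Set.add (List.foldl PySem.Set.add ([] : List Char) pre) c
      = List.foldl PySem.Set.add ([] : List Char) pre := by
    have hm : c ∈ List.foldl PySem.Set.add ([] : List Char) pre :=
      (mem_foldl_add_iff pre c).2 h
    simp [PySem.Set.add, List.contains_eq_mem, hm]
  rw [hc]

lemma dedup_append_singleton_of_not_mem {pre : List Char} {c : Char} (h : c ∉ pre) :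
    PySem.List.dedup (pre ++ [c]) = PySem.List.dedup pre ++ [c] := by
  simp only [PySem.List.dedup, PySem.Set.ofList, PySem.Set.empty, List.foldl_append,
    List.foldl_cons, List.foldl_nil]
  have hm : c ∉ List.foldl PySem.Set.add ([] : List Char) pre :=
    fun hc => h ((mem_foldl_add_iff pre c).1 hc)
  simp [PySem.Set.add, List.contains_eq_mem, hm]

lemma dedup_prefix (pre suf : List Char) :
    ∃ t, PySem.List.dedup (pre ++ suf) = PySem.List.dedup pre ++ t := by
  simp only [PySem.List.dedup, PySem.Set.ofList, List.foldl_append]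
  exact foldl_add_prefix suf _

-- a fresh letter lands at position (dedup pre).length
lemma idxOf_dedup_fresh {pre : List Char} {c : Char} (h : c ∉ pre) (suf : List Char) :
    List.idxOf c (PySem.List.dedup (pre ++ c :: suf)) = (PySem.List.dedup pre).length := by
  have h1 : pre ++ c :: suf = (pre ++ [c]) ++ suf := by simp
  obtain ⟨t, ht⟩ := dedup_prefix (pre ++ [c]) suf
  have hm : c ∉ PySem.List.dedup pre := by simpa [PySem.List.mem_dedup] using h
  rw [h1, ht, dedup_append_singleton_of_not_mem h, List.append_assoc, List.idxOf_append,
    if_neg hm]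
  simp

-- the invariant of A's loop: the emitted numbers are indices into dedup of the full word
lemma loopA_inv (suf : List Char) : ∀ (pre : List Char) (d : PySem.Dict Char String)
    (pat : List String),
    (∀ c', d.contains c' = decide (c' ∈ pre)) →
    (∀ c' ∈ pre, d.getD c' "" =
        PySem.Int.toStr (List.idxOf c' (PySem.List.dedup (pre ++ suf)))) →
    (suf.foldl word2patternStep (((PySem.List.dedup pre).length : Int), d, pat)).2.2 =
      pat ++ suf.map (fun c =>
        PySem.Int.toStr (List.idxOf c (PySem.List.dedup (pre ++ suf)))) := by
  induction suf with
  | nil => intro pre d pat _ _; simp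
  | cons c suf ih =>
    intro pre d pat hcont hget
    have hassoc : (pre ++ [c]) ++ suf = pre ++ c :: suf := by simp
    simp only [List.foldl_cons, List.map_cons]
    by_cases hc : c ∈ pre
    · -- seen letter: dict unchanged
      have hcontc : d.contains c = true := by rw [hcont c]; simp [hc]
      have hstep : word2patternStep (((PySem.List.dedup pre).length : Int), d, pat) c
          = (((PySem.List.dedup pre).length : Int), d, pat ++ [d.getD c ""]) := by
        simp [word2patternStep, hcontc]
      rw [hstep, hget c hc]
      have hd : PySem.List.dedup (pre ++ [c]) = PySem.List.dedup pre := by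
        simpa using dedup_mid_of_mem hc []
      have hlen : ((PySem.List.dedup pre).length : Int)
          = ((PySem.List.dedup (pre ++ [c])).length : Int) := by rw [hd]
      rw [hlen]
      have hIH := ih (pre ++ [c]) d
        (pat ++ [PySem.Int.toStr (List.idxOf c (PySem.List.dedup (pre ++ c :: suf)))])
        (fun c' => by
          rw [hcont c']
          by_cases h : c' = c <;> simp [h, hc])
        (fun c' hc' => by
          have hc'' : c' ∈ pre := by
            rcases List.mem_append.1 hc' with h | h
            · exact h
            · obtain rfl := List.mem_singleton.1 h; exact hc
          rw [hassoc]
          exact hget c' hc'')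
      rw [hassoc] at hIH
      rw [hIH]
      simp
    · -- fresh letter: insert, emit (dedup pre).length
      have hcontc : d.contains c = false := by rw [hcont c]; simp [hc]
      have hstep : word2patternStep (((PySem.List.dedup pre).length : Int), d, pat) c
          = (((PySem.List.dedup pre).length : Int) + 1,
             d.insert c (PySem.Int.toStr ((PySem.List.dedup pre).length : Int)),
             pat ++ [(d.insert c
               (PySem.Int.toStr ((PySem.List.dedup pre).length : Int))).getD c ""]) := by
        simp [word2patternStep, hcontc]
      have hval : ((d.insert c (PySem.Int.toStr ((PySem.List.dedup pre).length : Int))).getD c "")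
          = PySem.Int.toStr (List.idxOf c (PySem.List.dedup (pre ++ c :: suf))) := by
        rw [PySem.Dict.getD_insert_self, idxOf_dedup_fresh hc suf]
      rw [hstep, hval]
      have hded : PySem.List.dedup (pre ++ [c]) = PySem.List.dedup pre ++ [c] :=
        dedup_append_singleton_of_not_mem hc
      have hlen : ((PySem.List.dedup pre).length : Int) + 1
          = ((PySem.List.dedup (pre ++ [c])).length : Int) := by
        rw [hded]; simp
      rw [hlen]
      have hIH := ih (pre ++ [c])
        (d.insert c (PySem.Int.toStr ((PySem.List.dedup pre).length : Int)))
        (pat ++ [PySem.Int.toStr (List.idxOf c (PySem.List.dedup (pre ++ c :: suf)))])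
        (fun c' => by
          rw [PySem.Dict.contains_insert, hcont c']
          by_cases h : c' = c <;> simp [h])
        (fun c' hc' => by
          rw [hassoc]
          by_cases h : c' = c
          · subst h
            rw [PySem.Dict.getD_insert_self, idxOf_dedup_fresh hc suf]
          · have hc'' : c' ∈ pre := by
              rcases List.mem_append.1 hc' with hm | hm
              · exact hm
              · exact absurd (List.mem_singleton.1 hm) h
            rw [PySem.Dict.getD_insert, if_neg h]
            exact hget c' hc'')
      rw [hassoc] at hIH
      rw [hIH]
      simp

-- B's formula: the number of distinct letters before c's first occurrence is c's dedup index
lemma B_formula (u : List Char) (c : Char) (hc : c ∈ u) :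
    (match PySem.List.index? u c with
      | some i => PySem.Int.toStr ((PySem.Set.ofList (PySem.List.slice u none (some (i : Int)))).length : Int)
      | none => "")
      = PySem.Int.toStr (List.idxOf c (PySem.List.dedup u)) := by
  obtain ⟨i, hi⟩ := Option.isSome_iff_exists.1 ((PySem.List.index?_isSome_iff u c).2 hc)
  obtain ⟨pre, suf, hu, hlen, hnot⟩ := (PySem.List.index?_eq_some_iff u c i).1 hi
  rw [hi]
  have hslice : PySem.List.slice u none (some (i : Int)) = u.take i :=
    PySem.List.slice_to_natCast u i
  have htake : u.take i = pre := by
    subst hu; rw [← hlen]; simpa using List.take_left pre (c :: suf)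
  have hidx : List.idxOf c (PySem.List.dedup u) = (PySem.List.dedup pre).length := by
    rw [hu]; exact idxOf_dedup_fresh hnot suf
  simp only [hslice, htake, hidx, ← PySem.List.dedup_eq_ofList]

-- ===== VERDICT (by name: the statement is the Claim_ definition above) =====
theorem word2pattern_spec : Claim_equal_word2pattern := by
  intro word _
  unfold Spec_word2pattern word2pattern word2pattern_alt
  set u := (PySem.Str.upper word).toList with hu
  have hA := loopA_inv u [] PySem.Dict.empty []
    (fun c' => by simp [PySem.Dict.contains_empty])
    (fun c' hc' => absurd hc' (List.not_mem_nil))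
  have h0 : ((PySem.List.dedup ([] : List Char)).length : Int) = 0 := by
    simp [PySem.List.dedup, PySem.Set.ofList, PySem.Set.empty]
  rw [h0, List.nil_append] at hA
  rw [hA]
  exact congrArg (PySem.Str.join ".")
    (List.map_congr_left fun c hc => (B_formula u c hc).symm)
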